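-- pv_equiv track=rewrite | github.com/naurelma/hello-world | pytho/mistborndice.py | count
-- ===== SOURCE A (Python) =====
-- def count(arr):
--         lkm = [0,0,0,0,0,0]
--         for i in range(6):
--                 lkm[i]=arr.count(i+1)
--         nudge = lkm.pop()
--         curr = 0
--         for i in range(5):
--                 if lkm[i]>1:
--                         curr=i+1
--         return (curr,nudge)
-- ===== SOURCE B (Python) =====
-- def count(arr):
--     seen = 0   # bitmask: face f (1..5) occurred at least once
--     rep = 0    # bitmask: face f (1..5) occurred at least twice
--     nudge = 0
--     for x in arr:
--         if x == 6:
--             nudge += 1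
--         elif 1 <= x <= 5:
--             bit = 1 << x
--             if seen & bit:
--                 rep |= bit
--             else:
--                 seen |= bit
--     curr = rep.bit_length() - 1 if rep else 0
--     return (curr, nudge)
-- ===== Notes on version B (the rewrite author's own statement) =====
-- stated objective: alternative
-- what changed: Replaces face counting entirely: one pass maintains two bitmasks (faces seen once vs seen again) and a sixes counter, and the answer is the highest set bit of the repeat mask via bit_length, instead of A's six arr.count() passes and a range(5) scan over a count list.
import Mathlib
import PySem

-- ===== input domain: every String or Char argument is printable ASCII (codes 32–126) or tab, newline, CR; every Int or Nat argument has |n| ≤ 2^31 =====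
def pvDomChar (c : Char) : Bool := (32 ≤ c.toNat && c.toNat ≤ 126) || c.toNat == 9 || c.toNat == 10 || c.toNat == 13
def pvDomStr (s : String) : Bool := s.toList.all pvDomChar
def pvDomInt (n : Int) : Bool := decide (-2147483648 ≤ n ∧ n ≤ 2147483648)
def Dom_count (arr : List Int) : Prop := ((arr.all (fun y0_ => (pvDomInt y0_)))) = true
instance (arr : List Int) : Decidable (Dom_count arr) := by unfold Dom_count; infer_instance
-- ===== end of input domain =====

-- B drops face counting: one pass keeps two bitmasks (seen once / seen again) and a sixes
-- counter, then reads the answer off as the highest set bit of the repeat mask.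

-- ===== PORT A =====
def count (arr : List Int) : Int × Int :=
  let lkm : List Int := (PySem.List.pyRange 0 6 1).foldl
    (fun l i => PySem.List.pySetD l i ((PySem.List.count arr (i+1) : Int))) [0,0,0,0,0,0]
  match PySem.List.pop? lkm (-1) with
  | some (nudge, lkm2) =>
    let curr := (PySem.List.pyRange 0 5 1).foldl
      (fun curr i => if PySem.List.pyGetD lkm2 i 0 > 1 then i+1 else curr) 0
    (curr, nudge)
  | none => (0, 0)  -- unreachable: lkm always has 6 elements

-- ===== PORT B =====
-- Source B's loop body; state = (seen, rep, nudge). The '1 <= x <= 5' guard makes x.toNat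
-- exact (x ≥ 1), so 'bit = 1 << x' is ported as '1 <<< x.toNat'.
def bstep (s : Nat × Nat × Int) (x : Int) : Nat × Nat × Int :=
  if x = 6 then (s.1, s.2.1, s.2.2 + 1)
  else if 1 ≤ x ∧ x ≤ 5 then
    let bit : Nat := 1 <<< x.toNat
    if s.1 &&& bit ≠ 0 then (s.1, s.2.1 ||| bit, s.2.2)
    else (s.1 ||| bit, s.2.1, s.2.2)
  else s

-- 'rep.bit_length() - 1 if rep else 0': for rep > 0, bit_length(rep) - 1 = Nat.log2 rep (exact).
def count_alt (arr : List Int) : Int × Int :=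
  let st := arr.foldl bstep (0, 0, 0)
  ((if st.2.1 = 0 then 0 else (Nat.log2 st.2.1 : Int)), st.2.2)

-- ===== PRECONDITION & SPEC =====
def Spec_count (arr : List Int) (out : Int × Int) : Prop := out = count_alt arr
instance (arr : List Int) (out : Int × Int) : Decidable (Spec_count arr out) := by unfold Spec_count; infer_instance

-- ===== CLAIM (what is proved, stated in full; the proofs are below) =====
def Claim_equal_count : Prop := ∀ (arr : List Int), Dom_count arr → Spec_count arr (count arr)

-- ===== LEMMAS AND PROOFS =====

-- bitmask with flag b_f for face f (bit 2^f)
def mask (b1 b2 b3 b4 b5 : Bool) : Nat :=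
  (if b1 then 2 else 0) ||| (if b2 then 4 else 0) ||| (if b3 then 8 else 0) |||
  (if b4 then 16 else 0) ||| (if b5 then 32 else 0)

lemma andbit1 : ∀ s1 s2 s3 s4 s5 : Bool, ((mask s1 s2 s3 s4 s5 &&& 2 ≠ 0) ↔ s1 = true) := by decide
lemma orbit1 : ∀ b1 b2 b3 b4 b5 : Bool, mask b1 b2 b3 b4 b5 ||| 2 = mask true b2 b3 b4 b5 := by decide
lemma step1 (s1 s2 s3 s4 s5 r1 r2 r3 r4 r5 : Bool) (n : Int) :
    bstep (mask s1 s2 s3 s4 s5, mask r1 r2 r3 r4 r5, n) 1 =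
      (mask true s2 s3 s4 s5, mask (r1 || s1) r2 r3 r4 r5, n) := by
  have hb : (1:Nat) <<< ((1:Int)).toNat = 2 := by decide
  by_cases h : s1 = true
  · simp only [bstep, hb]; norm_num [andbit1, h, orbit1]
  · have h' : s1 = false := by simpa using h
    subst h'; simp only [bstep, hb]; norm_num [andbit1, orbit1]
lemma andbit2 : ∀ s1 s2 s3 s4 s5 : Bool, ((mask s1 s2 s3 s4 s5 &&& 4 ≠ 0) ↔ s2 = true) := by decide
lemma orbit2 : ∀ b1 b2 b3 b4 b5 : Bool, mask b1 b2 b3 b4 b5 ||| 4 = mask b1 true b3 b4 b5 := by decide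
lemma step2 (s1 s2 s3 s4 s5 r1 r2 r3 r4 r5 : Bool) (n : Int) :
    bstep (mask s1 s2 s3 s4 s5, mask r1 r2 r3 r4 r5, n) 2 =
      (mask s1 true s3 s4 s5, mask r1 (r2 || s2) r3 r4 r5, n) := by
  have hb : (1:Nat) <<< ((2:Int)).toNat = 4 := by decide
  by_cases h : s2 = true
  · simp only [bstep, hb]; norm_num [andbit2, h, orbit2]
  · have h' : s2 = false := by simpa using h
    subst h'; simp only [bstep, hb]; norm_num [andbit2, orbit2]
lemma andbit3 : ∀ s1 s2 s3 s4 s5 : Bool, ((mask s1 s2 s3 s4 s5 &&& 8 ≠ 0) ↔ s3 = true) := by decide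
lemma orbit3 : ∀ b1 b2 b3 b4 b5 : Bool, mask b1 b2 b3 b4 b5 ||| 8 = mask b1 b2 true b4 b5 := by decide
lemma step3 (s1 s2 s3 s4 s5 r1 r2 r3 r4 r5 : Bool) (n : Int) :
    bstep (mask s1 s2 s3 s4 s5, mask r1 r2 r3 r4 r5, n) 3 =
      (mask s1 s2 true s4 s5, mask r1 r2 (r3 || s3) r4 r5, n) := by
  have hb : (1:Nat) <<< ((3:Int)).toNat = 8 := by decide
  by_cases h : s3 = true
  · simp only [bstep, hb]; norm_num [andbit3, h, orbit3]
  · have h' : s3 = false := by simpa using h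
    subst h'; simp only [bstep, hb]; norm_num [andbit3, orbit3]
lemma andbit4 : ∀ s1 s2 s3 s4 s5 : Bool, ((mask s1 s2 s3 s4 s5 &&& 16 ≠ 0) ↔ s4 = true) := by decide
lemma orbit4 : ∀ b1 b2 b3 b4 b5 : Bool, mask b1 b2 b3 b4 b5 ||| 16 = mask b1 b2 b3 true b5 := by decide
lemma step4 (s1 s2 s3 s4 s5 r1 r2 r3 r4 r5 : Bool) (n : Int) :
    bstep (mask s1 s2 s3 s4 s5, mask r1 r2 r3 r4 r5, n) 4 =
      (mask s1 s2 s3 true s5, mask r1 r2 r3 (r4 || s4) r5, n) := by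
  have hb : (1:Nat) <<< ((4:Int)).toNat = 16 := by decide
  by_cases h : s4 = true
  · simp only [bstep, hb]; norm_num [andbit4, h, orbit4]
  · have h' : s4 = false := by simpa using h
    subst h'; simp only [bstep, hb]; norm_num [andbit4, orbit4]
lemma andbit5 : ∀ s1 s2 s3 s4 s5 : Bool, ((mask s1 s2 s3 s4 s5 &&& 32 ≠ 0) ↔ s5 = true) := by decide
lemma orbit5 : ∀ b1 b2 b3 b4 b5 : Bool, mask b1 b2 b3 b4 b5 ||| 32 = mask b1 b2 b3 b4 true := by decide
lemma step5 (s1 s2 s3 s4 s5 r1 r2 r3 r4 r5 : Bool) (n : Int) :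
    bstep (mask s1 s2 s3 s4 s5, mask r1 r2 r3 r4 r5, n) 5 =
      (mask s1 s2 s3 s4 true, mask r1 r2 r3 r4 (r5 || s5), n) := by
  have hb : (1:Nat) <<< ((5:Int)).toNat = 32 := by decide
  by_cases h : s5 = true
  · simp only [bstep, hb]; norm_num [andbit5, h, orbit5]
  · have h' : s5 = false := by simpa using h
    subst h'; simp only [bstep, hb]; norm_num [andbit5, orbit5]

lemma step6 (a b : Nat) (n : Int) : bstep (a, b, n) 6 = (a, b, n + 1) := by
  simp [bstep]

lemma step_skip (a b : Nat) (n : Int) (x : Int) (h6 : ¬ x = 6) (h : ¬ (1 ≤ x ∧ x ≤ 5)) :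
    bstep (a, b, n) x = (a, b, n) := by
  simp [bstep, h6, h]

lemma mem_absorb (a : Int) (xs : List Int) (t : Bool) :
    ((t || decide (a ∈ xs)) || decide (2 ≤ xs.count a)) = (t || decide (a ∈ xs)) := by
  by_cases h : 2 ≤ xs.count a
  · have hm : a ∈ xs := List.count_pos_iff.mp (by omega)
    simp [h, hm]
  · simp [h]

lemma inv (arr : List Int) (s1 s2 s3 s4 s5 r1 r2 r3 r4 r5 : Bool) (n : Int) :
    arr.foldl bstep (mask s1 s2 s3 s4 s5, mask r1 r2 r3 r4 r5, n) =
      (mask (s1 || decide (1 ≤ arr.count 1)) (s2 || decide (1 ≤ arr.count 2))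
            (s3 || decide (1 ≤ arr.count 3)) (s4 || decide (1 ≤ arr.count 4))
            (s5 || decide (1 ≤ arr.count 5)),
       mask (r1 || (s1 && decide (1 ≤ arr.count 1)) || decide (2 ≤ arr.count 1))
            (r2 || (s2 && decide (1 ≤ arr.count 2)) || decide (2 ≤ arr.count 2))
            (r3 || (s3 && decide (1 ≤ arr.count 3)) || decide (2 ≤ arr.count 3))
            (r4 || (s4 && decide (1 ≤ arr.count 4)) || decide (2 ≤ arr.count 4))
            (r5 || (s5 && decide (1 ≤ arr.count 5)) || decide (2 ≤ arr.count 5)),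
       n + (arr.count 6 : Int)) := by
  induction arr generalizing s1 s2 s3 s4 s5 r1 r2 r3 r4 r5 n with
  | nil => simp
  | cons x xs ih =>
    by_cases h6 : x = 6
    · subst h6
      rw [List.foldl_cons, step6, ih]
      simp
      ring
    · by_cases hx : 1 ≤ x ∧ x ≤ 5
      · rcases show x = 1 ∨ x = 2 ∨ x = 3 ∨ x = 4 ∨ x = 5 by omega with rfl|rfl|rfl|rfl|rfl
        · rw [List.foldl_cons, step1, ih]; simp [mem_absorb]
        · rw [List.foldl_cons, step2, ih]; simp [mem_absorb]
        · rw [List.foldl_cons, step3, ih]; simp [mem_absorb]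
        · rw [List.foldl_cons, step4, ih]; simp [mem_absorb]
        · rw [List.foldl_cons, step5, ih]; simp [mem_absorb]
      · rw [List.foldl_cons, step_skip _ _ _ _ h6 hx, ih]
        have h1 : x ≠ 1 := by omega
        have h2 : x ≠ 2 := by omega
        have h3 : x ≠ 3 := by omega
        have h4 : x ≠ 4 := by omega
        have h5 : x ≠ 5 := by omega
        simp [h1, h2, h3, h4, h5, h6]


-- read-off: highest set bit of the repeat mask = A's "last i with flag" scan
lemma readoff (b1 b2 b3 b4 b5 : Bool) :
    (if mask b1 b2 b3 b4 b5 = 0 then (0 : Int) else (Nat.log2 (mask b1 b2 b3 b4 b5) : Int)) =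
      (if b5 then 5 else if b4 then 4 else if b3 then 3 else if b2 then 2 else if b1 then 1 else 0) := by
  revert b1 b2 b3 b4 b5; decide

-- ===== VERDICT (by name: the statement is the Claim_ definition above) =====
theorem count_spec : Claim_equal_count := by
  intro arr _
  unfold Spec_count count count_alt
  rw [show ((0:Nat), (0:Nat), (0:Int)) = (mask false false false false false, mask false false false false false, (0:Int)) from by decide]
  rw [inv]
  rw [show PySem.List.pyRange 0 6 1 = [0,1,2,3,4,5] from by decide,
      show PySem.List.pyRange 0 5 1 = [0,1,2,3,4] from by decide]
  simp only [List.foldl_cons, List.foldl_nil]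
  rw [readoff]
  simp [PySem.List.pySetD, PySem.List.pySet?, PySem.List.pop?, PySem.List.pyIdx?,
        PySem.List.pyGetD, PySem.List.pyGet?, PySem.List.count_eq]
  norm_num [Nat.lt_iff_add_one_le]
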